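-- pv_equiv track=rewrite | github.com/miliar/Code_Jam_Webscraper | solutions_python/Problem_36/477.py | solve
-- ===== SOURCE A (Python) =====
-- welcome = "welcome to code jam"
--
-- def solve(case):
--     i = -1
--     layer = []
--     while 1:
--         i = case.find("w", i + 1)
--         if i == -1:
--             break
--         layer.append(i)
--
--     for c in welcome[1:]:
--         layer2 = layer[:]
--         layer = []
--         for w in layer2:
--             i = w
--             while 1:
--                 i = case.find(c, i + 1)
--                 if i == -1:
--                     break
--                 layer.append(i)
--
--     return len(layer)
-- ===== SOURCE B (Python) =====
-- def solve(case):
--     target = "welcome to code jam"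
--     dp = [1] + [0] * len(target)
--     for ch in case:
--         new = [dp[0]]
--         for j in range(1, len(dp)):
--             new.append(dp[j] + (dp[j - 1] if ch == target[j - 1] else 0))
--         dp = new
--     return dp[-1]
-- ===== Notes on version B (the rewrite author's own statement) =====
-- stated objective: faster
-- what changed: replaces the layer-by-layer enumeration of every partial embedding (one list entry per way to embed a prefix of 'welcome to code jam', exponentially many) with a 20-entry subsequence-count DP updated once per input character
import Mathlib
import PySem

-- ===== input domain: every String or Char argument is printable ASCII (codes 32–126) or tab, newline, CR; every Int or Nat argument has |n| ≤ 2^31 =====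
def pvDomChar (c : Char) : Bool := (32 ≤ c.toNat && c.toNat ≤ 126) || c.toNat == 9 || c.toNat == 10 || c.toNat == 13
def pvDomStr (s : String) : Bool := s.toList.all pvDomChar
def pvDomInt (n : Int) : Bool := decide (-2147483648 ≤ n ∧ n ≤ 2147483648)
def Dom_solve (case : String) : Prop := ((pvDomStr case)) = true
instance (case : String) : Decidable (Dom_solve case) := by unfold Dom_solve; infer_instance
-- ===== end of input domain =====

-- B replaces A's explicit enumeration of all partial embeddings (exponentially many list
-- entries) with a 20-entry subsequence-count DP updated once per input character (faster,
-- as measured on the generated inputs).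

-- ===== PORT A =====
-- module constant `welcome`
def welcomeA : String := "welcome to code jam"

-- the `while 1: i = case.find(c, i+1); …` loop of A: collect successive find results,
-- guarded by fuel (a found index is ≥ the start, so s.length + 1 steps always suffice)
def findAllA (s : List Char) (c : Char) : Nat → Nat → List Int
  | 0, _ => []        -- fuel guard only: never reached from the initial fuel s.length + 1
  | fuel + 1, start =>
    let j := PySem.Chars.findFrom s [c] (start : Int) none
    if j = -1 then [] else j :: findAllA s c fuel (j.toNat + 1)

-- A: first loop is find("w", i+1) from i = -1, i.e. start 0; then for each further char of
-- welcome[1:], each w in the previous layer spawns the finds starting at w+1.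
def solve (case : String) : Int :=
  let s := case.toList
  let layer0 : List Int := findAllA s 'w' (s.length + 1) 0
  let layer := (PySem.Str.slice welcomeA (some 1) none).toList.foldl
      (fun layer2 c => layer2.foldl
        (fun acc w => acc ++ findAllA s c (s.length + 1) ((w + 1).toNat)) []) layer0
  (layer.length : Int)

-- ===== PORT B =====
def targetB : List Char := "welcome to code jam".toList

-- inner loop: new.append(dp[j] + (dp[j-1] if ch == target[j-1] else 0)), walking target,
-- the previous dp entry and the current dp entry together
def updB (ch : Char) : List Char → Int → List Int → List Int
  | [], _, _ => []
  | _ :: _, _, [] => []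
  | t :: ts, prev, d :: ds => (d + if ch = t then prev else 0) :: updB ch ts d ds

def stepB (ch : Char) (dp : List Int) : List Int :=
  match dp with
  | [] => []
  | d0 :: ds => d0 :: updB ch targetB d0 ds

-- dp[-1] on the (always nonempty) dp list is its last element
def solve_alt (case : String) : Int :=
  let dp0 : List Int := 1 :: List.replicate targetB.length 0
  let dp := case.toList.foldl (fun dp ch => stepB ch dp) dp0
  dp.getLastD 0

-- ===== PRECONDITION & SPEC =====
def Spec_solve (case : String) (out : Int) : Prop := out = solve_alt case
instance (case : String) (out : Int) : Decidable (Spec_solve case out) := by unfold Spec_solve; infer_instance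

-- ===== CLAIM (what is proved, stated in full; the proofs are below) =====
def Claim_equal_solve : Prop := ∀ (case : String), Dom_solve case → Spec_solve case (solve case)

-- ===== LEMMAS AND PROOFS =====

-- the common specification: number of ways p occurs as a subsequence of s
def c2 : List Char → List Char → Nat
  | _, [] => 1
  | [], _ :: _ => 0
  | a :: s, d :: p => c2 s (d :: p) + (if a = d then c2 s p else 0)

theorem c2_snoc (s : List Char) (a : Char) (q : List Char) (d : Char) :
    c2 (s ++ [a]) (q ++ [d]) = c2 s (q ++ [d]) + (if a = d then c2 s q else 0) := by
  induction s generalizing q with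
  | nil =>
    cases q with
    | nil => simp [c2]
    | cons e q' =>
      cases q' with
      | nil => simp [c2]
      | cons f q'' => simp [c2]
  | cons b s' ih =>
    cases q with
    | nil =>
      have h1 := ih []
      simp only [List.nil_append] at h1
      simp only [List.cons_append, List.nil_append, c2, h1]
      split_ifs <;> omega
    | cons e q' =>
      have h1 := ih (e :: q')
      have h2 := ih q'
      simp only [List.cons_append] at h1 h2 ⊢
      simp only [c2, h1, h2]
      split_ifs <;> omega

-- ---- B side ----

theorem c2_nil_of_ne (p : List Char) (hp : p ≠ []) : c2 [] p = 0 := by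
  cases p with
  | nil => exact absurd rfl hp
  | cons a l => rfl

-- the list of nonempty prefixes of (q ++ P) extending q
def prefSeg : List Char → List Char → List (List Char)
  | _, [] => []
  | q, c :: P => (q ++ [c]) :: prefSeg (q ++ [c]) P

theorem prefSeg_map_c2_nil : ∀ (P q : List Char),
    (prefSeg q P).map (fun p => (c2 [] p : Int)) = List.replicate P.length 0 := by
  intro P
  induction P with
  | nil => intro q; rfl
  | cons c P' ih =>
    intro q
    simp only [prefSeg, List.map_cons, List.length_cons, List.replicate_succ]
    rw [c2_nil_of_ne (q ++ [c]) (by simp), ih (q ++ [c])]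
    rfl

theorem prefSeg_getLastD : ∀ (P q : List Char) (c : Char) (d : List Char),
    (prefSeg q (c :: P)).getLastD d = q ++ (c :: P) := by
  intro P
  induction P with
  | nil => intro q c d; simp [prefSeg]
  | cons e P' ih =>
    intro q c d
    rw [show prefSeg q (c :: e :: P')
        = (q ++ [c]) :: prefSeg (q ++ [c]) (e :: P') from rfl]
    rw [List.getLastD_cons, ih (q ++ [c]) e (q ++ [c])]
    simp

theorem getLastD_map_cons : ∀ (l : List (List Char)) (x0 : List Char)
    (f : List Char → Int) (d : Int),
    ((x0 :: l).map f).getLastD d = f ((x0 :: l).getLastD []) := by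
  intro l
  induction l with
  | nil => intro x0 f d; simp
  | cons y l' ih =>
    intro x0 f d
    rw [List.map_cons, List.getLastD_cons, ih y f (f x0)]
    simp

theorem updB_prefSeg (a : Char) (t : List Char) :
    ∀ (P q : List Char),
      updB a P ((c2 t q : Int)) ((prefSeg q P).map (fun p => (c2 t p : Int)))
        = (prefSeg q P).map (fun p => (c2 (t ++ [a]) p : Int)) := by
  intro P
  induction P with
  | nil => intro q; simp [prefSeg, updB]
  | cons c P' ih =>
    intro q
    simp only [prefSeg, List.map_cons, updB]
    congr 1
    · rw [c2_snoc]
      push_cast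
      split <;> simp
    · exact ih (q ++ [c])

theorem foldB (t : List Char) :
    t.foldl (fun dp ch => stepB ch dp) (1 :: List.replicate targetB.length 0)
      = (c2 t [] : Int) :: (prefSeg [] targetB).map (fun p => (c2 t p : Int)) := by
  induction t using List.reverseRecOn with
  | nil =>
    rw [List.foldl_nil, prefSeg_map_c2_nil targetB []]
    rfl
  | append_singleton t a ih =>
    rw [List.foldl_append, ih]
    simp only [List.foldl_cons, List.foldl_nil, stepB]
    have := updB_prefSeg a t targetB []
    rw [this]
    simp [c2]

theorem solve_alt_eq_c2 (case : String) :
    solve_alt case = (c2 case.toList targetB : Int) := by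
  have hdef : solve_alt case
      = (List.foldl (fun dp ch => stepB ch dp)
          (1 :: List.replicate targetB.length 0) case.toList).getLastD 0 := rfl
  rw [hdef, foldB]
  rw [show ((c2 case.toList [] : Int) :: (prefSeg [] targetB).map
        (fun p => (c2 case.toList p : Int)))
      = (([] : List Char) :: prefSeg [] targetB).map
        (fun p => (c2 case.toList p : Int)) from rfl]
  rw [getLastD_map_cons]
  have h2 : (([] : List Char) :: prefSeg [] targetB).getLastD [] = targetB := by
    rw [List.getLastD_cons]
    rw [show targetB = 'w' :: "elcome to code jam".toList from rfl]
    have h3 := prefSeg_getLastD "elcome to code jam".toList [] 'w' []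
    simpa using h3
  rw [h2]

-- ---- A side ----

-- a find start past the end of the string finds nothing
theorem pvFindFromOOB (s : List Char) (sub : List Char) (start : Nat)
    (h : s.length < start) : PySem.Chars.findFrom s sub (start : Int) none = -1 := by
  simp only [PySem.Chars.findFrom]
  split_ifs <;> omega

theorem singleton_prefix_iff (c : Char) (l : List Char) : [c] <+: l ↔ l.head? = some c := by
  cases l with
  | nil => simp
  | cons a l' =>
    constructor
    · rintro ⟨t, ht⟩
      simp at ht
      simp [ht.1]
    · intro h
      simp at h
      exact ⟨l', by simp [h]⟩

theorem singleton_infix_iff (c : Char) (l : List Char) : [c] <:+: l ↔ c ∈ l := by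
  constructor
  · intro h
    exact h.mem (by simp)
  · intro h
    obtain ⟨i, hi, he⟩ := List.getElem_of_mem h
    exact ⟨l.take i, l.drop (i + 1), by
      rw [← he, List.append_assoc, List.singleton_append,
        ← List.drop_eq_getElem_cons hi, List.take_append_drop]⟩

theorem mem_drop_iff (s : List Char) (a : Nat) (c : Char) :
    c ∈ s.drop a ↔ ∃ i, a ≤ i ∧ s[i]? = some c := by
  constructor
  · intro h
    obtain ⟨k, hk, he⟩ := List.getElem_of_mem h
    refine ⟨a + k, by omega, ?_⟩
    rw [← List.getElem?_drop]
    simp [List.getElem?_eq_getElem hk, he]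
  · rintro ⟨i, hai, hi⟩
    have hlt : i < s.length := (List.getElem?_eq_some_iff.mp hi).1
    have : (s.drop a)[i - a]? = some c := by
      rw [List.getElem?_drop]
      rwa [show a + (i - a) = i from by omega]
    exact List.mem_of_getElem? this

theorem filter_range_split (n j0 a : Nat) (p : Nat → Bool)
    (haj : a ≤ j0) (hj : j0 < n) (hpj : p j0 = true)
    (hmin : ∀ i, a ≤ i → i < j0 → p i = false) :
    (List.range n).filter (fun i => decide (a ≤ i) && p i)
      = j0 :: (List.range n).filter (fun i => decide (j0 + 1 ≤ i) && p i) := by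
  induction n with
  | zero => omega
  | succ m ih =>
    by_cases hm : j0 < m
    · rw [List.range_succ, List.filter_append, List.filter_append, ih hm]
      by_cases hp : p m <;>
        simp [hp, show a ≤ m from by omega, show j0 < m from hm]
    · have hm' : m = j0 := by omega
      subst hm'
      rw [List.range_succ, List.filter_append, List.filter_append]
      have h1 : (List.range m).filter (fun i => decide (a ≤ i) && p i) = [] := by
        apply List.filter_eq_nil_iff.mpr
        intro i hi
        simp only [List.mem_range] at hi
        by_cases hai : a ≤ i
        · simp [hmin i hai hi]
        · simp [hai]
      have h2 : (List.range m).filter (fun i => decide (m + 1 ≤ i) && p i) = [] := by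
        apply List.filter_eq_nil_iff.mpr
        intro i hi
        simp only [List.mem_range] at hi
        simp [show ¬ (m + 1 ≤ i) from by omega]
      rw [h1, h2]
      simp [haj, hpj]

theorem findAllA_eq (s : List Char) (c : Char) :
    ∀ (fuel start : Nat), s.length + 1 - start ≤ fuel →
      findAllA s c fuel start
        = ((List.range s.length).filter
            (fun i => decide (start ≤ i) && (s[i]? == some c))).map (fun (i : Nat) => (i : Int)) := by
  have filter_nil : ∀ a : Nat, (∀ i, a ≤ i → i < s.length → ¬ s[i]? = some c) →
      (List.range s.length).filter (fun i => decide (a ≤ i) && (s[i]? == some c)) = [] := by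
    intro a ha
    apply List.filter_eq_nil_iff.mpr
    intro i hi
    simp only [List.mem_range] at hi
    by_cases hai : a ≤ i
    · simp [hai, ha i hai hi]
    · simp [hai]
  intro fuel
  induction fuel with
  | zero =>
    intro start hk
    rw [show findAllA s c 0 start = [] from rfl]
    rw [filter_nil start (fun i _ hi => by omega)]
    rfl
  | succ fuel ih =>
    intro start hk
    by_cases h : PySem.Chars.findFrom s [c] (start : Int) none = -1
    · rw [findAllA]
      simp only [h, reduceIte]
      by_cases hle : start ≤ s.length
      · have hno : ¬ [c] <:+: s.drop start :=
          (PySem.Chars.findFrom_natCast_eq_neg_one_iff s [c] start hle).mp h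
        rw [singleton_infix_iff, mem_drop_iff] at hno
        push Not at hno
        rw [filter_nil start (fun i hai _ hic => hno i hai hic)]
        rfl
      · rw [filter_nil start (fun i _ hi => by omega)]
        rfl
    · rw [findAllA]
      simp only [h, if_false]
      have hle : start ≤ s.length := by
        by_contra hgt
        exact h (pvFindFromOOB s [c] start (by omega))
      obtain ⟨hj1, hj2, hj3⟩ := PySem.Chars.findFrom_natCast_spec s [c] start hle h
      set j := PySem.Chars.findFrom s [c] (start : Int) none with hjdef
      have hj0 : (0 : Int) ≤ j := le_trans (Int.natCast_nonneg start) hj1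
      have hjc : s[j.toNat]? = some c := by
        rw [← List.head?_drop]
        exact (singleton_prefix_iff c _).mp hj2
      have hjlt : j.toNat < s.length := (List.getElem?_eq_some_iff.mp hjc).1
      have hsj : start ≤ j.toNat := by omega
      have hmin : ∀ i, start ≤ i → i < j.toNat → ¬ (s[i]? = some c) := by
        intro i h1 h2 hc
        exact hj3 i h1 h2 ((singleton_prefix_iff c _).mpr (by rw [List.head?_drop]; exact hc))
      rw [filter_range_split s.length j.toNat start (fun i => s[i]? == some c) hsj hjlt
        (by simp [hjc]) (fun i h1 h2 => by simp [hmin i h1 h2])]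
      rw [List.map_cons]
      congr 1
      · exact (Int.toNat_of_nonneg hj0).symm
      · exact ih (j.toNat + 1) (by omega)

theorem c2_nil' (s : List Char) : c2 s [] = 1 := by cases s <;> rfl

theorem sum_range_single (n a : Nat) (v : Nat → Nat) :
    ((List.range n).map (fun i => if i = a then v i else 0)).sum = if a < n then v a else 0 := by
  induction n with
  | zero => simp
  | succ m ih =>
    rw [List.range_succ, List.map_append, List.sum_append, ih]
    by_cases h : a < m
    · simp [h, show a < m + 1 from by omega, show ¬ (m = a) from by omega]
    · by_cases h2 : m = a
      · subst h2
        simp [show m < m + 1 from by omega]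
      · simp [h, h2, show ¬ (a < m + 1) from by omega]

-- first-occurrence decomposition of c2, in "start index" form
theorem c2_drop (s : List Char) (c : Char) (q : List Char) :
    ∀ a, c2 (s.drop a) (c :: q)
      = ((List.range s.length).map
          (fun i => if a ≤ i ∧ s[i]? = some c then c2 (s.drop (i + 1)) q else 0)).sum := by
  have hnil : ∀ a : Nat, s.length ≤ a →
      c2 (s.drop a) (c :: q)
        = ((List.range s.length).map
            (fun i => if a ≤ i ∧ s[i]? = some c then c2 (s.drop (i + 1)) q else 0)).sum := by
    intro a ha
    rw [List.drop_eq_nil_of_le ha]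
    rw [show c2 [] (c :: q) = 0 from rfl]
    symm
    apply List.sum_eq_zero
    intro x hx
    simp only [List.mem_map, List.mem_range] at hx
    obtain ⟨i, hi, hxe⟩ := hx
    rw [← hxe, if_neg]
    rintro ⟨h1, _⟩
    omega
  have main : ∀ (k a : Nat), s.length - a ≤ k →
      c2 (s.drop a) (c :: q)
        = ((List.range s.length).map
            (fun i => if a ≤ i ∧ s[i]? = some c then c2 (s.drop (i + 1)) q else 0)).sum := by
    intro k
    induction k with
    | zero => exact fun a hk => hnil a (by omega)
    | succ k ih =>
      intro a hk
      by_cases hlt : a < s.length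
      · have hpt : ∀ i, (if a ≤ i ∧ s[i]? = some c then c2 (s.drop (i + 1)) q else 0)
            = (if a + 1 ≤ i ∧ s[i]? = some c then c2 (s.drop (i + 1)) q else 0)
              + (if i = a then (if s[i]? = some c then c2 (s.drop (i + 1)) q else 0) else 0) := by
          intro i
          by_cases h1 : i = a
          · subst h1
            by_cases h2 : s[i]? = some c <;>
              simp [h2, show ¬ (i + 1 ≤ i) from by omega]
          · by_cases h2 : a ≤ i
            · simp [h1, h2, show a + 1 ≤ i from by omega]
            · simp [h1, h2, show ¬ (a + 1 ≤ i) from by omega]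
        rw [List.drop_eq_getElem_cons hlt]
        rw [show c2 (s[a] :: s.drop (a + 1)) (c :: q)
            = c2 (s.drop (a + 1)) (c :: q) + (if s[a] = c then c2 (s.drop (a + 1)) q else 0)
          from rfl]
        rw [ih (a + 1) (by omega)]
        rw [List.map_congr_left (fun i _ => hpt i), List.sum_map_add, sum_range_single]
        simp [hlt]
      · exact hnil a (by omega)
  intro a
  exact main (s.length - a) a le_rfl

theorem sum_filter_map (l : List Nat) (p : Nat → Bool) (g : Nat → Nat) :
    ((l.filter p).map g).sum = (l.map (fun x => if p x then g x else 0)).sum := by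
  induction l with
  | nil => rfl
  | cons x l' ih =>
    by_cases h : p x = true
    · simp [h, ih]
    · simp [h, ih]

theorem sum_ones {A : Type} (L : List A) : (L.map (fun _ => (1 : Nat))).sum = L.length := by
  induction L with
  | nil => rfl
  | cons x L' ih =>
    simp only [List.map_cons, List.sum_cons, ih, List.length_cons]
    omega

theorem sum_map_flatMap (L : List Int) (f : Int → List Int) (g : Int → Nat) :
    ((L.flatMap f).map g).sum = (L.map (fun w => ((f w).map g).sum)).sum := by
  induction L with
  | nil => rfl
  | cons x L' ih => simp [List.flatMap_cons, ih]

theorem mainA (s : List Char) :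
    ∀ (q : List Char) (L : List Int), (∀ w ∈ L, ∃ i : Nat, w = (i : Int)) →
      (q.foldl (fun L2 c => L2.foldl (fun acc w => acc ++ findAllA s c (s.length + 1) ((w + 1).toNat)) []) L).length
        = (L.map (fun w => c2 (s.drop ((w + 1).toNat)) q)).sum := by
  intro q
  induction q with
  | nil =>
    intro L hL
    simp only [List.foldl_nil]
    rw [List.map_congr_left (fun w (_ : w ∈ L) => c2_nil' (s.drop ((w + 1).toNat)))]
    rw [sum_ones]
  | cons c q' ih =>
    intro L hL
    simp only [List.foldl_cons]
    rw [PySem.List.foldl_append_eq_flatMap, List.nil_append]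
    have hmem : ∀ x ∈ L.flatMap (fun w => findAllA s c (s.length + 1) ((w + 1).toNat)),
        ∃ i : Nat, x = (i : Int) := by
      intro x hx
      rw [List.mem_flatMap] at hx
      obtain ⟨w, hw, hxw⟩ := hx
      rw [findAllA_eq s c _ _ (by omega)] at hxw
      rw [List.mem_map] at hxw
      obtain ⟨i, _, hi⟩ := hxw
      exact ⟨i, hi.symm⟩
    rw [ih _ hmem, sum_map_flatMap]
    apply congrArg List.sum
    apply List.map_congr_left
    intro w hw
    obtain ⟨i, rfl⟩ := hL w hw
    rw [show (((i : Int)) + 1).toNat = i + 1 from by omega,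
      findAllA_eq s c _ _ (by omega), List.map_map]
    have hcomp : ∀ j ∈ (List.range s.length).filter
        (fun i2 => decide (i + 1 ≤ i2) && (s[i2]? == some c)),
        ((fun w => c2 (s.drop ((w + 1).toNat)) q') ∘ (fun (i : Nat) => (i : Int))) j
          = c2 (s.drop (j + 1)) q' := by
      intro j _
      simp only [Function.comp_apply]
      rw [show (((j : Nat) : Int) + 1).toNat = j + 1 from by omega]
    rw [List.map_congr_left hcomp]
    rw [sum_filter_map, c2_drop]
    apply congrArg List.sum
    apply List.map_congr_left
    intro j _
    by_cases h1 : i + 1 ≤ j <;> by_cases h2 : s[j]? = some c <;> simp [h1, h2]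

theorem solve_eq_c2 (case : String) : solve case = (c2 case.toList targetB : Int) := by
  have hdef : solve case
      = ((((PySem.Str.slice welcomeA (some 1) none).toList.foldl
          (fun layer2 c => layer2.foldl
            (fun acc w => acc ++ findAllA case.toList c (case.toList.length + 1) ((w + 1).toNat)) [])
          (findAllA case.toList 'w' (case.toList.length + 1) 0)).length : Int)) := rfl
  rw [hdef]
  rw [show (PySem.Str.slice welcomeA (some 1) none).toList = "elcome to code jam".toList
    from by decide]
  have hmem0 : ∀ x ∈ findAllA case.toList 'w' (case.toList.length + 1) 0,
      ∃ i : Nat, x = (i : Int) := by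
    intro x hx
    rw [findAllA_eq case.toList 'w' _ _ (by omega)] at hx
    rw [List.mem_map] at hx
    obtain ⟨i, _, hi⟩ := hx
    exact ⟨i, hi.symm⟩
  rw [mainA case.toList "elcome to code jam".toList
    (findAllA case.toList 'w' (case.toList.length + 1) 0) hmem0]
  apply congrArg Nat.cast
  rw [findAllA_eq case.toList 'w' _ _ (by omega), List.map_map]
  have hcomp : ∀ j ∈ (List.range case.toList.length).filter
      (fun i => decide (0 ≤ i) && (case.toList[i]? == some 'w')),
      ((fun w => c2 (case.toList.drop ((w + 1).toNat)) "elcome to code jam".toList)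
          ∘ (fun (i : Nat) => (i : Int))) j
        = c2 (case.toList.drop (j + 1)) "elcome to code jam".toList := by
    intro j _
    simp only [Function.comp_apply]
    rw [show (((j : Nat) : Int) + 1).toNat = j + 1 from by omega]
  rw [List.map_congr_left hcomp]
  rw [sum_filter_map]
  have hc := c2_drop case.toList 'w' "elcome to code jam".toList 0
  rw [List.drop_zero] at hc
  rw [show targetB = 'w' :: "elcome to code jam".toList from by decide, hc]
  apply congrArg List.sum
  apply List.map_congr_left
  intro j _
  by_cases h2 : case.toList[j]? = some 'w' <;> simp [h2]

-- ===== VERDICT (by name: the statement is the Claim_ definition above) =====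
theorem solve_spec : Claim_equal_solve := by
  intro case _
  unfold Spec_solve
  rw [solve_eq_c2, solve_alt_eq_c2]
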